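-- pv_equiv track=rewrite | github.com/NiCrook/Ebabit_Exercises | 60-69/63.py | largest_gap
-- ===== SOURCE A (Python) =====
-- def largest_gap(user_list: list) -> int:
--     user_list.sort()
--     current_gap = 0
--     while len(user_list) != 1:
--         gap = user_list[1] - user_list[0]
--         if gap > current_gap:
--             current_gap = gap
--         del user_list[0]
--     return current_gap
-- ===== SOURCE B (Python) =====
-- def largest_gap(user_list: list) -> int:
--     s = sorted(user_list)
--     return max((b - a for a, b in zip(s, s[1:])), default=0)
-- ===== Notes on version B (the rewrite author's own statement) =====
-- stated objective: faster
-- what changed: Replaces the quadratic sort-then-repeatedly-delete-the-head loop by a sorted copy and a single pass over consecutive differences (max with default 0); B also does not mutate its argument where A sorts and empties it in place.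
import Mathlib
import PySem

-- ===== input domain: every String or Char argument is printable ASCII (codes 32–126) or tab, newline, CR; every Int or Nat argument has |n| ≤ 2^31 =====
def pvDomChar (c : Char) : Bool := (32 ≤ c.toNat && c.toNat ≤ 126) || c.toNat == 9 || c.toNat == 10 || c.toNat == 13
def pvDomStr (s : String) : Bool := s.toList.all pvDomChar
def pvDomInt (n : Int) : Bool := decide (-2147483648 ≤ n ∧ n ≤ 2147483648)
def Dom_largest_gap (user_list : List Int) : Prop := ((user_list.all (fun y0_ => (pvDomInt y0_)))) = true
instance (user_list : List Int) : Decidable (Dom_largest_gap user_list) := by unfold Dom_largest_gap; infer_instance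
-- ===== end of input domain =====

-- B replaces A's quadratic sort-then-delete-head loop by one pass of consecutive differences over a
-- sorted copy (objective: faster, asymptotic). A sorts and empties its argument in place; B does not
-- mutate it — the equivalence proved here is about the return value only.

-- ===== PORT A =====
-- while len(user_list) != 1: gap = user_list[1]-user_list[0]; if gap > current_gap: ...; del user_list[0]
-- (for the empty list Python raises IndexError at user_list[1]; that input is excluded by Pre_)
def largest_gapA_loop : List Int → Int → Int
  | a :: b :: rest, current_gap =>
      largest_gapA_loop (b :: rest) (if b - a > current_gap then b - a else current_gap)
  | _, current_gap => current_gap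

def largest_gap (user_list : List Int) : Int :=
  largest_gapA_loop (PySem.List.sorted user_list (fun x => x) false) 0

-- ===== PORT B =====
def largest_gap_alt (user_list : List Int) : Int :=
  let s := PySem.List.sorted user_list (fun x => x) false
  PySem.List.maxD ((s.zip (s.drop 1)).map (fun p => p.2 - p.1)) (fun x => x) 0

-- ===== PRECONDITION & SPEC =====
-- Pre_ excludes only the empty list, on which A raises IndexError.
def Pre_largest_gap (user_list : List Int) : Prop := user_list ≠ []
instance (user_list : List Int) : Decidable (Pre_largest_gap user_list) := by
  unfold Pre_largest_gap; infer_instance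
def pvWitness_largest_gap : List Int := ([3, 1, 7])

def Spec_largest_gap (user_list : List Int) (out : Int) : Prop := out = largest_gap_alt user_list
instance (user_list : List Int) (out : Int) : Decidable (Spec_largest_gap user_list out) := by
  unfold Spec_largest_gap; infer_instance

-- ===== CLAIM (what is proved, stated in full; the proofs are below) =====
def Claim_equal_largest_gap : Prop := ∀ (user_list : List Int), Dom_largest_gap user_list → Pre_largest_gap user_list → Spec_largest_gap user_list (largest_gap user_list)

-- ===== LEMMAS AND PROOFS =====

-- A's running-max loop over a list equals a foldl max over the consecutive differences.
theorem largest_gapA_loop_eq : ∀ (s : List Int) (cur : Int),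
    largest_gapA_loop s cur = ((s.zip (s.drop 1)).map (fun p => p.2 - p.1)).foldl max cur
  | [], _ => by simp [largest_gapA_loop]
  | [a], _ => by simp [largest_gapA_loop]
  | a :: b :: rest, cur => by
    have hmax : (if b - a > cur then b - a else cur) = max cur (b - a) := by
      rw [max_def]; split_ifs <;> omega
    show largest_gapA_loop (b :: rest) (if b - a > cur then b - a else cur) = _
    rw [largest_gapA_loop_eq, hmax]
    simp only [List.drop_succ_cons, List.drop_zero, List.zip_cons_cons, List.map_cons,
      List.foldl_cons]

theorem foldl_max_pull (t : List Int) : ∀ (a b : Int),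
    t.foldl max (max a b) = max a (t.foldl max b) := by
  induction t with
  | nil => intro a b; simp
  | cons c t ih =>
    intro a b
    simp only [List.foldl_cons, max_assoc, ih]

theorem diffs_nonneg : ∀ (s : List Int), s.Pairwise (· ≤ ·) →
    ∀ g ∈ (s.zip (s.drop 1)).map (fun p => p.2 - p.1), 0 ≤ g
  | [], _, g, hg => by simp at hg
  | [_], _, g, hg => by simp at hg
  | a :: b :: rest, h, g, hg => by
    rw [List.pairwise_cons] at h
    have hab : a ≤ b := h.1 b (by simp)
    have htail := diffs_nonneg (b :: rest) h.2
    simp only [List.drop_succ_cons, List.drop_zero, List.zip_cons_cons, List.map_cons,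
      List.mem_cons] at hg ⊢
    rcases hg with hg | hg
    · omega
    · exact htail g (by simpa using hg)

-- ===== VERDICT (by name: the statement is the Claim_ definition above) =====
theorem largest_gap_spec : Claim_equal_largest_gap := by
  intro user_list _ hpre
  unfold Spec_largest_gap largest_gap largest_gap_alt
  set s := PySem.List.sorted user_list (fun x => x) false with hs
  have hsne : s ≠ [] := by
    rw [hs, Ne, PySem.List.sorted_eq_nil_iff]; exact hpre
  have hpw : s.Pairwise (· ≤ ·) := by
    rw [hs]; exact PySem.List.sorted_pairwise user_list (fun x => x)
  rw [largest_gapA_loop_eq]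
  match s, hsne with
  | [x], _ => simp [PySem.List.maxD_nil]
  | x :: y :: r, _ =>
    have hnn := diffs_nonneg (x :: y :: r) (by exact_mod_cast hpw)
    simp only [List.drop_succ_cons, List.drop_zero, List.zip_cons_cons, List.map_cons]
    rw [PySem.List.maxD_id_cons]
    calc (List.map (fun p => p.2 - p.1) ((y :: r).zip r)).foldl max (max 0 (y - x))
        = max 0 ((List.map (fun p => p.2 - p.1) ((y :: r).zip r)).foldl max (y - x)) := by
          rw [← foldl_max_pull]
      _ = (List.map (fun p => p.2 - p.1) ((y :: r).zip r)).foldl max (y - x) := by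
          have hle : (y - x) ≤ (List.map (fun p => p.2 - p.1) ((y :: r).zip r)).foldl max (y - x) :=
            (PySem.List.le_foldl_max _ _).1
          have := hnn (y - x) (by simp)
          omega
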